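-- pv_equiv track=rewrite | github.com/tomtseng/random-small-groups | random-small-groups.py | grouping_is_valid
-- ===== SOURCE A (Python) =====
-- from typing import Dict, List, Set
--
-- def grouping_is_valid(
--     proposed_grouping: List[Set[str]],
--     past_groups: List[Set[str]],
--     max_intersection_size: int,
-- ) -> bool:
--     """Returns true if no group in the proposed grouping intersects with any
--     past group with intersection size strictly greater than
--     `max_intersection_size`.
--     """
--     for group in proposed_grouping:
--         for past_group in past_groups:
--             if len(group & past_group) > max_intersection_size:
--                 return False
--     return True
-- ===== SOURCE B (Python) =====
-- from typing import Dict, List, Set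
--
-- def grouping_is_valid(
--     proposed_grouping: List[Set[str]],
--     past_groups: List[Set[str]],
--     max_intersection_size: int,
-- ) -> bool:
--     """Same contract as A, but instead of intersecting every (proposed, past)
--     pair, build an inverted index member -> past-group indices once, then for
--     each proposed group count shared members per past group via index lookups.
--     """
--     index: Dict[str, List[int]] = {}
--     for i, past_group in enumerate(past_groups):
--         for member in past_group:
--             index.setdefault(member, []).append(i)
--     n = len(past_groups)
--     for group in proposed_grouping:
--         counts = [0] * n
--         for member in group:
--             for i in index.get(member, ()):
--                 counts[i] += 1
--         if any(c > max_intersection_size for c in counts):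
--             return False
--     return True
-- ===== Notes on version B (the rewrite author's own statement) =====
-- stated objective: faster
-- what changed: Replaces the nested all-pairs set intersections with an inverted index member->past-group indices built once, so each proposed group counts its shared members per past group via hash lookups instead of intersecting it with every past group.
import Mathlib
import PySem

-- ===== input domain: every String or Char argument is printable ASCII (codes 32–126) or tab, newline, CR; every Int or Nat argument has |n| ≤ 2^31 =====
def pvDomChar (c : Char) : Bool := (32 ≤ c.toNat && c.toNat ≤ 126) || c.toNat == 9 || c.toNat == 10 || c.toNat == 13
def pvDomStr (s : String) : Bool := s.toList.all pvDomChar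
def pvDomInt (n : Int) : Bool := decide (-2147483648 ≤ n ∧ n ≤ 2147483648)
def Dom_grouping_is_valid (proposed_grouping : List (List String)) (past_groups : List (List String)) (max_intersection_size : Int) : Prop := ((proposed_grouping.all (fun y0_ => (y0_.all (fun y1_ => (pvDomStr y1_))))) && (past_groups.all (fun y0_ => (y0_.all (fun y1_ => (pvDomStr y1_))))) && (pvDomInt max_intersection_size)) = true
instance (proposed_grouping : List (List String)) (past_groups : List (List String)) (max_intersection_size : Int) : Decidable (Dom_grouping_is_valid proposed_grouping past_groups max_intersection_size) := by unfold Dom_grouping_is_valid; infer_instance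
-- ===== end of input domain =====

-- B replaces A's all-pairs set intersections with an inverted index member -> past-group
-- indices, counting shared members per past group via index lookups (objective: faster).


-- ===== PORT A =====
-- the inner 'for past_group in past_groups' loop with its early 'return False'
def aInner (group : List String) (past_groups : List (List String)) (max_intersection_size : Int) : Bool :=
  match past_groups with
  | [] => true
  | p :: rest =>
    if PySem.Set.len (PySem.Set.inter group p) > max_intersection_size then false
    else aInner group rest max_intersection_size

def grouping_is_valid (proposed_grouping : List (List String)) (past_groups : List (List String)) (max_intersection_size : Int) : Bool :=
  match proposed_grouping with
  | [] => true
  | g :: rest =>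
    if aInner g past_groups max_intersection_size then grouping_is_valid rest past_groups max_intersection_size
    else false

-- ===== PORT B =====
-- 'index.setdefault(member, []).append(i)' inside 'for i, past_group in enumerate(past_groups)'
def bIndex (past_groups : List (List String)) : PySem.Dict String (List Nat) :=
  (past_groups.zipIdx).foldl
    (fun d gi => gi.1.foldl (fun d m => d.modify m [] (fun l => l ++ [gi.2])) d)
    PySem.Dict.empty

-- 'counts[i] += 1'
def bBump (cs : List Int) (i : Nat) : List Int := cs.set i (cs.getD i 0 + 1)

-- 'counts = [0] * n; for member in group: for i in index.get(member, ()): counts[i] += 1'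
def bCounts (idx : PySem.Dict String (List Nat)) (n : Nat) (group : List String) : List Int :=
  group.foldl (fun cs m => (idx.getD m []).foldl bBump cs) (List.replicate n 0)

def grouping_is_valid_alt (proposed_grouping : List (List String)) (past_groups : List (List String)) (max_intersection_size : Int) : Bool :=
  let idx := bIndex past_groups
  let n := past_groups.length
  proposed_grouping.all (fun g => !((bCounts idx n g).any (fun c => c > max_intersection_size)))

-- ===== PRECONDITION & SPEC =====
-- Pre_ requires each past group to be duplicate-free: the List String arguments encode
-- Python sets (whose elements are distinct), so a list with a repeated member corresponds
-- to no input of the Python function at all — nothing A returns on is excluded.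
def Pre_grouping_is_valid (proposed_grouping : List (List String)) (past_groups : List (List String)) (max_intersection_size : Int) : Prop :=
  ∀ p ∈ past_groups, p.Nodup
instance (proposed_grouping : List (List String)) (past_groups : List (List String)) (max_intersection_size : Int) : Decidable (Pre_grouping_is_valid proposed_grouping past_groups max_intersection_size) := by unfold Pre_grouping_is_valid; infer_instance

def pvWitness_grouping_is_valid : List (List String) × List (List String) × Int :=
  ([["a", "b"], ["c"]], [["a", "c"], ["b"]], 1)

def Spec_grouping_is_valid (proposed_grouping : List (List String)) (past_groups : List (List String)) (max_intersection_size : Int) (out : Bool) : Prop := out = grouping_is_valid_alt proposed_grouping past_groups max_intersection_size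
instance (proposed_grouping : List (List String)) (past_groups : List (List String)) (max_intersection_size : Int) (out : Bool) : Decidable (Spec_grouping_is_valid proposed_grouping past_groups max_intersection_size out) := by unfold Spec_grouping_is_valid; infer_instance

-- ===== CLAIM (what is proved, stated in full; the proofs are below) =====
def Claim_equal_grouping_is_valid : Prop := ∀ (proposed_grouping : List (List String)) (past_groups : List (List String)) (max_intersection_size : Int), Dom_grouping_is_valid proposed_grouping past_groups max_intersection_size → Pre_grouping_is_valid proposed_grouping past_groups max_intersection_size → Spec_grouping_is_valid proposed_grouping past_groups max_intersection_size (grouping_is_valid proposed_grouping past_groups max_intersection_size)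

-- ===== LEMMAS AND PROOFS =====

-- the shared-member count of a group with one past group, the quantity both sides compute
def sharedLen (g p : List String) : Int := (g.filter (fun x => PySem.Set.contains p x)).length

-- ---- A side: A is the conjunction over all (group, past group) pairs ----
theorem aInner_eq_all (g : List String) (past : List (List String)) (m : Int) :
    aInner g past m = past.all (fun p => !(decide (sharedLen g p > m))) := by
  induction past with
  | nil => rfl
  | cons p rest ih =>
    simp only [aInner, List.all_cons, ih, sharedLen, PySem.Set.len, PySem.Set.inter]
    by_cases h : ((g.filter (fun x => PySem.Set.contains p x)).length : Int) > m <;> simp [h]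

theorem A_eq_all (pg past : List (List String)) (m : Int) :
    grouping_is_valid pg past m
      = pg.all (fun g => past.all (fun p => !(decide (sharedLen g p > m)))) := by
  induction pg with
  | nil => rfl
  | cons g rest ih =>
    simp only [grouping_is_valid, List.all_cons, aInner_eq_all, ih]
    by_cases h : past.all (fun p => !(decide (sharedLen g p > m))) <;> simp [h]

-- ---- B side ----
-- the (member, past-group index) incidence pairs, in the order B's index build visits them
def pairsAux (past : List (List String)) (k : Nat) : List (String × Nat) :=
  (past.zipIdx k).flatMap (fun gi => gi.1.map (fun mem => (mem, gi.2)))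

theorem foldl_flat (l : List (List String × Nat)) (d : PySem.Dict String (List Nat)) :
    l.foldl (fun d gi => gi.1.foldl (fun d m => d.modify m [] (fun l => l ++ [gi.2])) d) d
      = (l.flatMap (fun gi => gi.1.map (fun mem => (mem, gi.2)))).foldl
          (fun d p => d.modify p.1 [] (fun l => l ++ [p.2])) d := by
  induction l generalizing d with
  | nil => rfl
  | cons gi t ih =>
    simp only [List.foldl_cons, List.flatMap_cons, List.foldl_append, ih, List.foldl_map]

theorem bIndex_getD (past : List (List String)) (m : String) :
    (bIndex past).getD m [] = ((pairsAux past 0).filter (fun p => p.1 == m)).map (·.2) := by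
  unfold bIndex pairsAux
  rw [foldl_flat]
  rw [PySem.Dict.getD_foldl_modify_append]
  simp [PySem.Dict.getD_empty]

theorem count_map_pair (p : List String) (k : Nat) (m : String) (j : Nat) :
    (p.map (fun mem => (mem, k))).count (m, j) = if j = k then p.count m else 0 := by
  split_ifs with h
  · subst h
    exact List.count_map_of_injective p (fun mem => (mem, j)) (fun a b hab => congrArg Prod.fst hab) m
  · refine List.count_eq_zero.mpr ?_
    simp only [List.mem_map]
    rintro ⟨x, -, hx⟩
    exact h (congrArg Prod.snd hx).symm

theorem count_pairsAux (past : List (List String)) (k : Nat) (m : String) (j : Nat) :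
    (pairsAux past k).count (m, j)
      = if h : k ≤ j ∧ j - k < past.length then (past[j - k]'h.2).count m else 0 := by
  induction past generalizing k with
  | nil => simp [pairsAux]
  | cons p rest ih =>
    have hsplit : pairsAux (p :: rest) k = p.map (fun mem => (mem, k)) ++ pairsAux rest (k + 1) := by
      simp [pairsAux, List.zipIdx_cons]
    rw [hsplit, List.count_append, count_map_pair, ih]
    by_cases hjk : j = k
    · rw [if_pos hjk, dif_neg (by omega : ¬ (k + 1 ≤ j ∧ j - (k+1) < rest.length)),
        dif_pos (by constructor; omega; simpa using (by omega : j - k < rest.length + 1) : k ≤ j ∧ j - k < (p :: rest).length)]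
      subst hjk; simp
    · rw [if_neg hjk]
      by_cases h1 : k + 1 ≤ j ∧ j - (k + 1) < rest.length
      · have h2 : k ≤ j ∧ j - k < (p :: rest).length := by
          simp only [List.length_cons]; omega
        rw [dif_pos h1, dif_pos h2]
        have hji : j - k = (j - (k+1)) + 1 := by omega
        simp [hji]
      · have h2 : ¬ (k ≤ j ∧ j - k < (p :: rest).length) := by
          simp only [List.length_cons]; omega
        rw [dif_neg h1, dif_neg h2]

theorem count_filter_map (pairs : List (String × Nat)) (m : String) (j : Nat) :
    ((pairs.filter (fun p => p.1 == m)).map (·.2)).count j = pairs.count (m, j) := by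
  induction pairs with
  | nil => rfl
  | cons p t ih =>
    by_cases h1 : p.1 = m
    · by_cases h2 : p.2 = j
      · have : p = (m, j) := Prod.ext h1 h2
        subst this
        simp [List.count_cons, ih]
      · have hne : ¬ p = (m, j) := by rintro rfl; exact h2 rfl
        simp [List.filter_cons, h1, List.count_cons, h2, ih, hne]
    · have hne : ¬ p = (m, j) := by rintro rfl; exact h1 rfl
      simp [List.filter_cons, h1, List.count_cons, ih, hne]

theorem length_foldl_bump (S : List Nat) (cs : List Int) :
    (S.foldl bBump cs).length = cs.length := by
  induction S generalizing cs with
  | nil => rfl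
  | cons i t ih => simp [List.foldl_cons, ih, bBump]

theorem getD_set (cs : List Int) (i : Nat) (v : Int) (j : Nat) (hi : i < cs.length) :
    (cs.set i v).getD j 0 = if j = i then v else cs.getD j 0 := by
  split_ifs with h
  · subst h; simp [List.getD_eq_getElem?_getD, List.getElem?_set_self, hi]
  · simp [List.getD_eq_getElem?_getD, List.getElem?_set_ne (by omega : i ≠ j)]

theorem foldl_bump (S : List Nat) (cs : List Int) (h : ∀ i ∈ S, i < cs.length) :
    ∀ j, (S.foldl bBump cs).getD j 0 = cs.getD j 0 + S.count j := by
  induction S generalizing cs with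
  | nil => simp
  | cons i t ih =>
    intro j
    have hi : i < cs.length := h i (List.mem_cons_self ..)
    have hlen : (bBump cs i).length = cs.length := by simp [bBump]
    rw [List.foldl_cons, ih (bBump cs i) (fun x hx => hlen ▸ h x (List.mem_cons_of_mem _ hx)) j]
    unfold bBump
    rw [getD_set cs i _ j hi]
    by_cases hj : j = i
    · subst hj; simp; ring
    · simp [hj, Ne.symm hj]

theorem bCounts_eq_flatMap (idx : PySem.Dict String (List Nat)) (n : Nat) (g : List String) :
    bCounts idx n g = (g.flatMap (fun m => idx.getD m [])).foldl bBump (List.replicate n 0) := by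
  unfold bCounts
  generalize (List.replicate n (0 : Int)) = cs
  induction g generalizing cs with
  | nil => rfl
  | cons m t ih => simp [List.foldl_cons, List.flatMap_cons, List.foldl_append, ih]

theorem index_count (past : List (List String)) (hnd : ∀ p ∈ past, p.Nodup)
    (m : String) (j : Nat) (hj : j < past.length) :
    ((bIndex past).getD m []).count j = if m ∈ past[j] then 1 else 0 := by
  rw [bIndex_getD, count_filter_map, count_pairsAux]
  rw [dif_pos ⟨Nat.zero_le _, by simpa using hj⟩]
  simp only [Nat.sub_zero]
  by_cases hm : m ∈ past[j]
  · rw [if_pos hm, List.count_eq_one_of_mem (hnd _ (List.getElem_mem _)) hm]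
  · rw [if_neg hm, List.count_eq_zero_of_not_mem hm]

theorem index_mem_lt (past : List (List String)) (m : String) (i : Nat)
    (hi : i ∈ (bIndex past).getD m []) : i < past.length := by
  by_contra h
  have h0 := count_pairsAux past 0 m i
  rw [dif_neg (by omega)] at h0
  have : ((bIndex past).getD m []).count i = 0 := by
    rw [bIndex_getD, count_filter_map]; exact h0
  exact absurd this (by simpa [List.count_eq_zero] using List.count_pos_iff.mpr hi |>.ne')

theorem count_flatMap (g : List String) (f : String → List Nat) (j : Nat) :
    (g.flatMap f).count j = (g.map (fun m => (f m).count j)).sum := by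
  induction g with
  | nil => rfl
  | cons m t ih => simp [List.flatMap_cons, List.count_append, ih]

-- the heart: for j < n, counts[j] is exactly the shared-member count with past[j]
theorem bCounts_getD (past : List (List String)) (g : List String)
    (hnd : ∀ p ∈ past, p.Nodup) (j : Nat) (hj : j < past.length) :
    (bCounts (bIndex past) past.length g).getD j 0 = sharedLen g past[j] := by
  rw [bCounts_eq_flatMap, foldl_bump _ _ (fun i hi => by
      rw [List.length_replicate]
      rcases List.mem_flatMap.mp hi with ⟨m, -, hm⟩
      exact index_mem_lt past m i hm)]
  rw [List.getD_eq_getElem?_getD, List.getElem?_replicate, if_pos hj]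
  simp only [Option.getD_some, zero_add]
  rw [count_flatMap]
  unfold sharedLen
  induction g with
  | nil => rfl
  | cons m t ih =>
    rw [List.map_cons, List.sum_cons, index_count past hnd m j hj, List.filter_cons]
    by_cases hm : m ∈ past[j]
    · rw [if_pos hm, if_pos (by simpa [PySem.Set.contains_iff] using hm)]
      rw [Nat.cast_add, ih, List.length_cons]
      push_cast
      ring
    · rw [if_neg hm, if_neg (by simpa [PySem.Set.contains_iff] using hm)]
      rw [Nat.cast_add, ih]
      simp

theorem not_any_eq_all_not (l : List (List String)) (f : List String → Bool) :
    (!l.any f) = l.all (fun x => !f x) := by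
  induction l with
  | nil => rfl
  | cons p t ih => simp [List.any_cons, List.all_cons, ← ih]

theorem B_group_eq (past : List (List String)) (g : List String)
    (hnd : ∀ p ∈ past, p.Nodup) (m : Int) :
    (!((bCounts (bIndex past) past.length g).any (fun c => c > m)))
      = past.all (fun p => !(decide (sharedLen g p > m))) := by
  have hlen : (bCounts (bIndex past) past.length g).length = past.length := by
    rw [bCounts_eq_flatMap, length_foldl_bump, List.length_replicate]
  have hany : (bCounts (bIndex past) past.length g).any (fun c => c > m)
      = past.any (fun p => decide (sharedLen g p > m)) := by
    rw [Bool.eq_iff_iff]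
    simp only [List.any_eq_true]
    constructor
    · rintro ⟨c, hc, hcm⟩
      rcases List.mem_iff_getElem.mp hc with ⟨j, hj, rfl⟩
      refine ⟨past[j]'(hlen ▸ hj), List.getElem_mem _, ?_⟩
      have := bCounts_getD past g hnd j (hlen ▸ hj)
      rw [List.getD_eq_getElem?_getD, List.getElem?_eq_getElem hj] at this
      simp only [Option.getD_some] at this
      simpa [← this] using hcm
    · rintro ⟨p, hp, hpm⟩
      rcases List.mem_iff_getElem.mp hp with ⟨j, hj, rfl⟩
      have := bCounts_getD past g hnd j hj
      rw [List.getD_eq_getElem?_getD, List.getElem?_eq_getElem (hlen.symm ▸ hj)] at this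
      simp only [Option.getD_some] at this
      refine ⟨(bCounts (bIndex past) past.length g)[j]'(hlen.symm ▸ hj), List.getElem_mem _, ?_⟩
      rw [this] at *
      simpa using hpm
  rw [hany, not_any_eq_all_not]

theorem all_congr' (l : List (List String)) (f f' : List String → Bool)
    (h : ∀ x ∈ l, f x = f' x) : l.all f = l.all f' := by
  induction l with
  | nil => rfl
  | cons a t ih => simp_all [List.all_cons]

-- ===== VERDICT (by name: the statement is the Claim_ definition above) =====
theorem grouping_is_valid_spec : Claim_equal_grouping_is_valid := by
  intro pg past m _ hpre
  unfold Spec_grouping_is_valid grouping_is_valid_alt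
  rw [A_eq_all]
  exact all_congr' pg _ _ (fun g _ => (B_group_eq past g hpre m).symm)
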